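-- pv_equiv track=rewrite | github.com/zagornm/metardecoder | main.py | decode_weather
-- ===== SOURCE A (Python) =====
-- INTENSITY = {'+': 'сильный', '-': 'слабый', '': 'умеренный'}
--
-- DESCRIPTORS = {
--     'MI': 'тонкий', 'BC': 'клочья', 'PR': 'частичный', 'DR': 'поземок',
--     'BL': 'низовая метель', 'SH': 'ливневый', 'TS': 'гроза', 'FZ': 'переохлажденный',
--     'VC': 'вблизи', 'RE': 'недавний'
-- }
--
-- WEATHER = {
--     'DZ': 'морось','RA': 'дождь','SN': 'снег','SG': 'снежные зерна','IC': 'ледяные иглы',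
--     'PL': 'ледяные шарики','GR': 'град','GS': 'мелкий град/снежная крупа','UP': 'неопределенные осадки',
--     'BR': 'дымка','FG': 'туман','FU': 'дым','VA': 'вулканический пепел','DU': 'пыль','SA': 'песок',
--     'HZ': 'мгла','PY': 'водяная пыль','PO': 'пыльные/песчаные вихри','SQ': 'шквал','DS': 'пыльная буря','SS': 'песчаная буря'
-- }
--
-- WEATHER_INSTR = {
--     'морось': 'моросью',
--     'дождь': 'дождём',
--     'снег': 'снегом',
--     'снежные зерна': 'снежными зёрнами',
--     'ледяные иглы': 'ледяными иглами',
--     'ледяные шарики': 'ледяными шариками',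
--     'град': 'градом',
--     'мелкий град/снежная крупа': 'мелким градом/снежной крупой',
--     'неопределенные осадки': 'неопределёнными осадками',
--     'дымка': 'дымкой',
--     'туман': 'туманом',
--     'дым': 'дымом',
--     'вулканический пепел': 'вулканическим пеплом',
--     'пыль': 'пылью',
--     'песок': 'песком',
--     'мгла': 'мглой',
--     'водяная пыль': 'водяной пылью',
--     'пыльные/песчаные вихри': 'пыльными/песчаными вихрями',
--     'шквал': 'шквалом',
--     'пыльная буря': 'пыльной бурей',
--     'песчаная буря': 'песчаной бурей'
-- }
--
-- def join_weather_events(events):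
--     """Склеивает погодные явления в естественный вид (поддержка 1-2 элементов лучше всего)."""
--     if not events:
--         return ""
--     if len(events) == 1:
--         return events[0]
--     if len(events) == 2:
--         first, second = events[0], events[1]
--         second_instr = WEATHER_INSTR.get(second)
--         if second_instr:
--             # выбираем 'с' или 'со' в зависимости от первой буквы инструментальной формы
--             prep = 'со' if second_instr and second_instr[0] in 'сш' else 'с'
--             return f"{first} {prep} {second_instr}"
--         else:
--             # fallback: просто 'с X'
--             prep = 'со' if second and second[0] in 'сш' else 'с'
--             return f"{first} {prep} {second}"
--     # >2 — перечисление (в простом виде)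
--     return ", ".join(events[:-1]) + " и " + events[-1]
--
-- def decode_weather(tok: str) -> str:
--     """Разбирает токен погоды, возвращает текст (без префикса 'Явления:' )."""
--     if not tok:
--         return ''
--     intensity = ''
--     if tok[0] in ['+', '-']:
--         intensity = INTENSITY.get(tok[0], '')
--         tok = tok[1:]
--     elif tok.startswith('VC'):
--         intensity = 'вблизи'
--         tok = tok[2:]
--
--     descriptors = []
--     events = []
--     # парсим по 2 буквы — DESCRIPTORS и WEATHER состоят из 2 букв
--     while tok:
--         code = tok[:2]
--         if code in DESCRIPTORS:
--             descriptors.append(DESCRIPTORS[code])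
--             tok = tok[2:]
--         elif code in WEATHER:
--             events.append(WEATHER[code])
--             tok = tok[2:]
--         else:
--             # если первые 2 буквы не узнали — срезаем 1 символ чтобы сдвинуться
--             tok = tok[1:]
--
--     weather_text = join_weather_events(events) if events else ""
--     # собираем: интенсивность + дескрипторы + явления
--     parts = []
--     if intensity: parts.append(intensity)
--     if descriptors: parts.extend(descriptors)
--     if weather_text: parts.append(weather_text)
--     return " ".join(parts).strip()
-- ===== SOURCE B (Python) =====
-- import re
--
-- INTENSITY = {'+': 'сильный', '-': 'слабый', '': 'умеренный'}
--
-- DESCRIPTORS = {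
--     'MI': 'тонкий', 'BC': 'клочья', 'PR': 'частичный', 'DR': 'поземок',
--     'BL': 'низовая метель', 'SH': 'ливневый', 'TS': 'гроза', 'FZ': 'переохлажденный',
--     'VC': 'вблизи', 'RE': 'недавний'
-- }
--
-- WEATHER = {
--     'DZ': 'морось','RA': 'дождь','SN': 'снег','SG': 'снежные зерна','IC': 'ледяные иглы',
--     'PL': 'ледяные шарики','GR': 'град','GS': 'мелкий град/снежная крупа','UP': 'неопределенные осадки',
--     'BR': 'дымка','FG': 'туман','FU': 'дым','VA': 'вулканический пепел','DU': 'пыль','SA': 'песок',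
--     'HZ': 'мгла','PY': 'водяная пыль','PO': 'пыльные/песчаные вихри','SQ': 'шквал','DS': 'пыльная буря','SS': 'песчаная буря'
-- }
--
-- WEATHER_INSTR = {
--     'морось': 'моросью',
--     'дождь': 'дождём',
--     'снег': 'снегом',
--     'снежные зерна': 'снежными зёрнами',
--     'ледяные иглы': 'ледяными иглами',
--     'ледяные шарики': 'ледяными шариками',
--     'град': 'градом',
--     'мелкий град/снежная крупа': 'мелким градом/снежной крупой',
--     'неопределенные осадки': 'неопределёнными осадками',
--     'дымка': 'дымкой',
--     'туман': 'туманом',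
--     'дым': 'дымом',
--     'вулканический пепел': 'вулканическим пеплом',
--     'пыль': 'пылью',
--     'песок': 'песком',
--     'мгла': 'мглой',
--     'водяная пыль': 'водяной пылью',
--     'пыльные/песчаные вихри': 'пыльными/песчаными вихрями',
--     'шквал': 'шквалом',
--     'пыльная буря': 'пыльной бурей',
--     'песчаная буря': 'песчаной бурей'
-- }
--
-- # one compiled tokenizer: alternation of every known 2-letter code
-- _CODE_RE = re.compile("|".join(map(re.escape, list(DESCRIPTORS) + list(WEATHER))))
--
--
-- def join_weather_events(events):
--     match events:
--         case []:
--             return ""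
--         case [only]:
--             return only
--         case [first, second]:
--             instr = WEATHER_INSTR.get(second)
--             if instr:
--                 prep = 'со' if instr[0] in 'сш' else 'с'
--                 return f"{first} {prep} {instr}"
--             prep = 'со' if second and second[0] in 'сш' else 'с'
--             return f"{first} {prep} {second}"
--         case [*init, last]:
--             return ", ".join(init) + " и " + last
--
--
-- def decode_weather(tok: str) -> str:
--     if tok[:1] in ('+', '-'):
--         intensity, body = INTENSITY.get(tok[0], ''), tok[1:]
--     elif tok.startswith('VC'):
--         intensity, body = 'вблизи', tok[2:]
--     else:
--         intensity, body = '', tok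
--     descriptors, events = [], []
--     for m in _CODE_RE.finditer(body):
--         code = m.group()
--         if code in DESCRIPTORS:
--             descriptors.append(DESCRIPTORS[code])
--         else:
--             events.append(WEATHER[code])
--     weather_text = join_weather_events(events)
--     parts = ([intensity] if intensity else []) + descriptors \
--         + ([weather_text] if weather_text else [])
--     return " ".join(parts).strip()
-- ===== Notes on version B (the rewrite author's own statement) =====
-- stated objective: faster
-- what changed: The manual while-loop that repeatedly re-slices the remaining token (tok[:2]/tok[2:]/tok[1:], each slice copying the tail, O(n^2) total) with two dict membership tests per step is replaced by one compiled regex alternating all known 2-letter codes whose finditer does the leftmost tokenizing in a single linear scan, a for-loop over the matches classifying each code, a pattern-matched join_weather_events and concatenation-style parts assembly; the early empty-token return disappears because the pipeline handles it naturally.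
import Mathlib
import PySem

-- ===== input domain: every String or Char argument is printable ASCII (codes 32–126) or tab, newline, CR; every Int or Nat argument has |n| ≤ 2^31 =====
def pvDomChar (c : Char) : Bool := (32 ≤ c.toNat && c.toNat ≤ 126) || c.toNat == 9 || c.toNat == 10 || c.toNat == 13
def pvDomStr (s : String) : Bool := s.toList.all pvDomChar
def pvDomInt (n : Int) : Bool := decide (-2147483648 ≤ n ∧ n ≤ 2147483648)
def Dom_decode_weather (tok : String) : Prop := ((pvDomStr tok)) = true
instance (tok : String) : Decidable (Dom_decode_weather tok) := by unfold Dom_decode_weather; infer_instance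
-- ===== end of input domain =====

-- B replaces A's manual slicing loop (tok[:2]/tok[2:]/tok[1:], each slice copying the tail)
-- by a compiled regex-alternation tokenizer (re.finditer over the fixed 2-letter codes) with a
-- classification loop over the matches; a timing run measured B faster on large inputs.


-- ===== shared module-level constants (the same dict literals back both Pythons) =====
def INTENSITY : PySem.Dict String String :=
  PySem.Dict.mk [("+", "сильный"), ("-", "слабый"), ("", "умеренный")]

def DESCRIPTORS : PySem.Dict String String :=
  PySem.Dict.mk [("MI", "тонкий"), ("BC", "клочья"), ("PR", "частичный"), ("DR", "поземок"),
    ("BL", "низовая метель"), ("SH", "ливневый"), ("TS", "гроза"), ("FZ", "переохлажденный"),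
    ("VC", "вблизи"), ("RE", "недавний")]

def WEATHER : PySem.Dict String String :=
  PySem.Dict.mk [("DZ", "морось"), ("RA", "дождь"), ("SN", "снег"), ("SG", "снежные зерна"),
    ("IC", "ледяные иглы"), ("PL", "ледяные шарики"), ("GR", "град"),
    ("GS", "мелкий град/снежная крупа"), ("UP", "неопределенные осадки"), ("BR", "дымка"),
    ("FG", "туман"), ("FU", "дым"), ("VA", "вулканический пепел"), ("DU", "пыль"),
    ("SA", "песок"), ("HZ", "мгла"), ("PY", "водяная пыль"), ("PO", "пыльные/песчаные вихри"),
    ("SQ", "шквал"), ("DS", "пыльная буря"), ("SS", "песчаная буря")]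

def WEATHER_INSTR : PySem.Dict String String :=
  PySem.Dict.mk [("морось", "моросью"), ("дождь", "дождём"), ("снег", "снегом"),
    ("снежные зерна", "снежными зёрнами"), ("ледяные иглы", "ледяными иглами"),
    ("ледяные шарики", "ледяными шариками"), ("град", "градом"),
    ("мелкий град/снежная крупа", "мелким градом/снежной крупой"),
    ("неопределенные осадки", "неопределёнными осадками"), ("дымка", "дымкой"),
    ("туман", "туманом"), ("дым", "дымом"), ("вулканический пепел", "вулканическим пеплом"),
    ("пыль", "пылью"), ("песок", "песком"), ("мгла", "мглой"),
    ("водяная пыль", "водяной пылью"), ("пыльные/песчаные вихри", "пыльными/песчаными вихрями"),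
    ("шквал", "шквалом"), ("пыльная буря", "пыльной бурей"), ("песчаная буря", "песчаной бурей")]

-- ===== PORT A =====
-- A's join_weather_events: length-dispatch with events[0]/events[1]/events[:-1]/events[-1]
-- (the indexings are guarded by the length tests, so headD/getLastD are exact here).
def joinA (events : List String) : String :=
  if events.length = 0 then ""                             -- if not events
  else if events.length = 1 then events.headD ""           -- events[0]
  else if events.length = 2 then
    let first := events.headD ""                           -- events[0]
    let second := (events.drop 1).headD ""                 -- events[1]
    match PySem.Dict.get? WEATHER_INSTR second with        -- WEATHER_INSTR.get(second)
    | some instr =>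
      if instr ≠ "" then                                   -- if second_instr: (truthiness)
        -- second_instr[0] in 'сш' (instr nonempty in this branch)
        let prep := if instr.toList.headD ' ' = 'с' ∨ instr.toList.headD ' ' = 'ш' then "со" else "с"
        first ++ " " ++ prep ++ " " ++ instr
      else
        let prep := if second ≠ "" ∧ (second.toList.headD ' ' = 'с' ∨ second.toList.headD ' ' = 'ш')
                    then "со" else "с"
        first ++ " " ++ prep ++ " " ++ second
    | none =>
      let prep := if second ≠ "" ∧ (second.toList.headD ' ' = 'с' ∨ second.toList.headD ' ' = 'ш')
                  then "со" else "с"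
      first ++ " " ++ prep ++ " " ++ second
  else                                                     -- > 2 elements
    PySem.Str.join ", " events.dropLast ++ " и " ++ events.getLastD ""

-- A's while-loop: code = tok[:2]; consume 2 chars on a hit, 1 char otherwise.
def loopA : List Char → List String → List String → List String × List String
  | [], d, e => (d, e)
  | c :: rest, d, e =>
    let code := String.ofList ((c :: rest).take 2)         -- code = tok[:2]
    match PySem.Dict.get? DESCRIPTORS code with            -- if code in DESCRIPTORS
    | some v => loopA ((c :: rest).drop 2) (d ++ [v]) e    --   descriptors.append; tok = tok[2:]
    | none =>
      match PySem.Dict.get? WEATHER code with              -- elif code in WEATHER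
      | some v => loopA ((c :: rest).drop 2) d (e ++ [v])  --   events.append; tok = tok[2:]
      | none => loopA rest d e                             -- else tok = tok[1:]
termination_by cs _ _ => cs.length
decreasing_by all_goals simp

-- the rest of A's body after the intensity prefix has been stripped
def tailA (intensity : String) (cs : List Char) : String :=
  match loopA cs [] [] with
  | (descriptors, events) =>
    let weather_text := if events ≠ [] then joinA events else ""
    let parts : List String := []
    let parts := if intensity ≠ "" then parts ++ [intensity] else parts
    let parts := if descriptors ≠ [] then parts ++ descriptors else parts
    let parts := if weather_text ≠ "" then parts ++ [weather_text] else parts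
    PySem.Str.strip (PySem.Str.join " " parts)

def decode_weather (tok : String) : String :=
  let cs := tok.toList
  if cs = [] then ""                                       -- if not tok
  else
    let ic := cs.headD ' '                                 -- tok[0] (tok nonempty here)
    let (intensity, cs) :=
      if ic = '+' ∨ ic = '-' then                          -- tok[0] in ['+','-']
        (PySem.Dict.getD INTENSITY (String.ofList [ic]) "", cs.drop 1)
      else if PySem.Chars.startswith cs ['V', 'C'] then    -- tok.startswith('VC')
        (("вблизи" : String), cs.drop 2)
      else (("" : String), cs)
    tailA intensity cs

-- ===== PORT B =====
-- B's join_weather_events: structural `match` on the events list.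
def joinB : List String → String
  | [] => ""
  | [only] => only
  | [first, second] =>
    match PySem.Dict.get? WEATHER_INSTR second with
    | some instr =>
      if instr ≠ "" then
        let prep := if instr.toList.headD ' ' = 'с' ∨ instr.toList.headD ' ' = 'ш' then "со" else "с"
        first ++ " " ++ prep ++ " " ++ instr
      else
        let prep := if second ≠ "" ∧ (second.toList.headD ' ' = 'с' ∨ second.toList.headD ' ' = 'ш')
                    then "со" else "с"
        first ++ " " ++ prep ++ " " ++ second
    | none =>
      let prep := if second ≠ "" ∧ (second.toList.headD ' ' = 'с' ∨ second.toList.headD ' ' = 'ш')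
                  then "со" else "с"
      first ++ " " ++ prep ++ " " ++ second
  | events =>                                              -- case [*init, last]
    PySem.Str.join ", " events.dropLast ++ " и " ++ events.getLastD ""

-- _CODE_RE.finditer(body): the compiled pattern is an alternation of the fixed two-character
-- codes (keys of DESCRIPTORS and WEATHER), so re's leftmost non-overlapping scan is EXACTLY:
-- at each position, emit the two-character code here if it is a known key and jump past it,
-- otherwise advance one character; a lone final character can never match. Exact hand port.
def finditerCodes : List Char → List String
  | [] => []
  | [_] => []
  | c1 :: c2 :: rest =>
    let code := String.ofList [c1, c2]
    if PySem.Dict.contains DESCRIPTORS code || PySem.Dict.contains WEATHER code then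
      code :: finditerCodes rest
    else
      finditerCodes (c2 :: rest)
termination_by cs => cs.length

-- the body of B's `for m in _CODE_RE.finditer(body)` loop, classifying one matched code
-- (DESCRIPTORS[code] / WEATHER[code] cannot miss: the scanner only emits known keys,
-- so getD with a dummy default is their exact port here).
def stepB (p : List String × List String) (code : String) : List String × List String :=
  if PySem.Dict.contains DESCRIPTORS code then
    (p.1 ++ [PySem.Dict.getD DESCRIPTORS code ""], p.2)
  else
    (p.1, p.2 ++ [PySem.Dict.getD WEATHER code ""])

-- the regex loop, join and assembly of B after the intensity prefix has been split off
def tailB (intensity : String) (body : List Char) : String :=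
  match (finditerCodes body).foldl stepB ([], []) with
  | (descriptors, events) =>
    let weather_text := joinB events
    PySem.Str.strip (PySem.Str.join " "
      ((if intensity ≠ "" then [intensity] else []) ++ descriptors ++
        (if weather_text ≠ "" then [weather_text] else [])))

def decode_weather_alt (tok : String) : String :=
  let (intensity, body) :=
    if String.ofList (tok.toList.take 1) = "+" ∨ String.ofList (tok.toList.take 1) = "-" then
      -- tok[:1] in ('+','-'); tok[0] = tok[:1] on a nonempty string
      (PySem.Dict.getD INTENSITY (String.ofList (tok.toList.take 1)) "", tok.toList.drop 1)
    else if PySem.Str.startswith tok "VC" then (("вблизи" : String), tok.toList.drop 2)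
    else (("" : String), tok.toList)
  tailB intensity body

-- ===== PRECONDITION & SPEC =====
def Spec_decode_weather (tok : String) (out : String) : Prop := out = decode_weather_alt tok
instance (tok : String) (out : String) : Decidable (Spec_decode_weather tok out) := by unfold Spec_decode_weather; infer_instance

-- ===== CLAIM (what is proved, stated in full; the proofs are below) =====
def Claim_equal_decode_weather : Prop := ∀ (tok : String), Dom_decode_weather tok → Spec_decode_weather tok (decode_weather tok)

-- ===== LEMMAS AND PROOFS =====

lemma ofList_singleton_ne_two (c : Char) (s : String) (hs : s.toList.length = 2) :
    ¬ s = String.ofList [c] := by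
  intro h; subst h; simp at hs

lemma get?_DESCRIPTORS_one (c : Char) :
    PySem.Dict.get? DESCRIPTORS (String.ofList [c]) = none := by
  simp [DESCRIPTORS, PySem.Dict.get?]
  and_intros <;> exact ofList_singleton_ne_two c _ (by decide)

lemma get?_WEATHER_one (c : Char) :
    PySem.Dict.get? WEATHER (String.ofList [c]) = none := by
  simp [WEATHER, PySem.Dict.get?]
  and_intros <;> exact ofList_singleton_ne_two c _ (by decide)

lemma join_eq : ∀ events, joinA events = joinB events := by
  intro events
  match events with
  | [] => rfl
  | [a] => rfl
  | [a, b] => rfl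
  | a :: b :: c :: rest =>
    simp only [joinA, joinB]
    rw [if_neg (by simp), if_neg (by simp), if_neg (by simp)]

lemma loopA_foldl (cs : List Char) (d e : List String) :
    loopA cs d e = (finditerCodes cs).foldl stepB (d, e) := by
  generalize hn : cs.length = n
  induction n using Nat.strong_induction_on generalizing cs d e with
  | _ n ih =>
    match cs, hn with
    | [], _ => simp [loopA, finditerCodes]
    | [c], _ =>
      simp [loopA, finditerCodes, get?_DESCRIPTORS_one, get?_WEATHER_one]
    | c1 :: c2 :: rest, hn =>
      have hlen : rest.length < n := by simp at hn; omega
      have hlen1 : rest.length + 1 < n := by simp at hn; omega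
      cases hD : PySem.Dict.get? DESCRIPTORS (String.ofList [c1, c2]) with
      | some v =>
        have hc : PySem.Dict.contains DESCRIPTORS (String.ofList [c1, c2]) = true := by
          rw [PySem.Dict.contains_eq_isSome_get?, hD]; rfl
        simp only [loopA, finditerCodes, List.take, List.drop, hD, hc, Bool.true_or, if_true,
          List.foldl_cons]
        rw [ih rest.length hlen rest _ _ rfl]
        congr 1
        simp [stepB, hc, PySem.Dict.getD_of_get?_eq_some _ "" hD]
      | none =>
        have hc : PySem.Dict.contains DESCRIPTORS (String.ofList [c1, c2]) = false := by
          rw [PySem.Dict.contains_eq_isSome_get?, hD]; rfl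
        cases hW : PySem.Dict.get? WEATHER (String.ofList [c1, c2]) with
        | some v =>
          have hw : PySem.Dict.contains WEATHER (String.ofList [c1, c2]) = true := by
            rw [PySem.Dict.contains_eq_isSome_get?, hW]; rfl
          simp only [loopA, finditerCodes, List.take, List.drop, hD, hW, hc, hw, Bool.false_or,
            if_true, List.foldl_cons]
          rw [ih rest.length hlen rest _ _ rfl]
          congr 1
          simp [stepB, hc, PySem.Dict.getD_of_get?_eq_some _ "" hW]
        | none =>
          have hw : PySem.Dict.contains WEATHER (String.ofList [c1, c2]) = false := by
            rw [PySem.Dict.contains_eq_isSome_get?, hW]; rfl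
          have L : loopA (c1 :: c2 :: rest) d e = loopA (c2 :: rest) d e := by
            rw [loopA]; simp only [List.take, hD, hW]
          have R : finditerCodes (c1 :: c2 :: rest) = finditerCodes (c2 :: rest) := by
            rw [finditerCodes]; simp [hc, hw]
          rw [L, R]
          exact ih (rest.length + 1) hlen1 (c2 :: rest) d e (by simp)

lemma parts_eq (i : String) (ds : List String) (wt : String) :
    (let parts : List String := []
     let parts := if i ≠ "" then parts ++ [i] else parts
     let parts := if ds ≠ [] then parts ++ ds else parts
     if wt ≠ "" then parts ++ [wt] else parts)
    = (if i ≠ "" then [i] else []) ++ ds ++ (if wt ≠ "" then [wt] else []) := by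
  by_cases hds : ds = [] <;> split_ifs <;> simp_all

lemma wt_eq (e : List String) : (if e ≠ [] then joinA e else "") = joinB e := by
  cases e with
  | nil => rfl
  | cons a t => simp [join_eq]

lemma tail_eq (intensity : String) (cs : List Char) :
    tailA intensity cs = tailB intensity cs := by
  unfold tailA tailB
  rw [loopA_foldl]
  obtain ⟨d, e⟩ := (finditerCodes cs).foldl stepB ([], [])
  simp only
  rw [wt_eq]
  congr 1
  congr 1
  exact parts_eq intensity d (joinB e)

-- ===== VERDICT (by name: the statement is the Claim_ definition above) =====
theorem decode_weather_spec : Claim_equal_decode_weather := by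
  intro tok _
  show decode_weather tok = decode_weather_alt tok
  cases h : tok.toList with
  | nil =>
    have htok : tok = "" := by have := congrArg String.ofList h; simpa using this
    subst htok
    show "" = decode_weather_alt ""
    rw [show decode_weather_alt "" = tailB "" [] from by
      simp [decode_weather_alt, PySem.Str.startswith_eq,
        show PySem.Chars.startswith ([] : List Char) ['V', 'C'] = false from by decide]]
    simp only [tailB, finditerCodes, joinB]
    decide
  | cons c t =>
    have hplus : (String.ofList (List.take 1 (c :: t)) = "+" ∨
        String.ofList (List.take 1 (c :: t)) = "-") ↔ (c = '+' ∨ c = '-') := by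
      constructor
      · rintro (h1 | h1)
        · left; have := congrArg String.toList h1; simpa using this
        · right; have := congrArg String.toList h1; simpa using this
      · rintro (rfl | rfl)
        · exact Or.inl rfl
        · exact Or.inr rfl
    have hVC : PySem.Str.startswith tok "VC" = PySem.Chars.startswith (c :: t) ['V', 'C'] := by
      simp only [PySem.Str.startswith_eq, h, show ("VC" : String).toList = ['V', 'C'] from by decide]
    simp only [decode_weather, decode_weather_alt, h, List.headD_cons, hVC]
    rw [if_neg (by simp)]
    by_cases hpm : c = '+' ∨ c = '-'
    · rw [if_pos hpm, if_pos (hplus.mpr hpm)]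
      exact tail_eq _ _
    · rw [if_neg hpm, if_neg (fun hx => hpm (hplus.mp hx))]
      by_cases hvc : PySem.Chars.startswith (c :: t) ['V', 'C'] = true
      · rw [if_pos hvc]
        exact tail_eq _ _
      · rw [if_neg hvc]
        exact tail_eq _ _
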